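-- pv_equiv track=rewrite | github.com/theagrik/chatstats-tg | main.py | remove_invalid_escape
-- ===== SOURCE A (Python) =====
-- def remove_invalid_escape(s, line, column):
--     current_line = 1
--     current_column = 1
--     for i, char in enumerate(s):
--         if current_line == line and current_column == column:
--             return s[:i - 1] + s[i:]
--         if char == '\n':
--             current_line += 1
--             current_column = 1
--         else:
--             current_column += 1
--     return s
-- ===== SOURCE B (Python) =====
-- def remove_invalid_escape(s, line, column):
--     lines = s.split('\n')
--     if line < 1 or line > len(lines) or column < 1:
--         return s
--     target = lines[line - 1]
--     limit = len(target) + 1 if line < len(lines) else len(target)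
--     if column > limit:
--         return s
--     offset = sum(len(l) + 1 for l in lines[:line - 1])
--     i = offset + column - 1
--     return s[:i - 1] + s[i:]
-- ===== Notes on version B (the rewrite author's own statement) =====
-- stated objective: faster
-- what changed: A walks the string character by character maintaining (line, column) counters with an early return; B splits the string on ' ' once, validates line/column against the line list, and computes the removal offset arithmetically as a running sum of line lengths.
import Mathlib
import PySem

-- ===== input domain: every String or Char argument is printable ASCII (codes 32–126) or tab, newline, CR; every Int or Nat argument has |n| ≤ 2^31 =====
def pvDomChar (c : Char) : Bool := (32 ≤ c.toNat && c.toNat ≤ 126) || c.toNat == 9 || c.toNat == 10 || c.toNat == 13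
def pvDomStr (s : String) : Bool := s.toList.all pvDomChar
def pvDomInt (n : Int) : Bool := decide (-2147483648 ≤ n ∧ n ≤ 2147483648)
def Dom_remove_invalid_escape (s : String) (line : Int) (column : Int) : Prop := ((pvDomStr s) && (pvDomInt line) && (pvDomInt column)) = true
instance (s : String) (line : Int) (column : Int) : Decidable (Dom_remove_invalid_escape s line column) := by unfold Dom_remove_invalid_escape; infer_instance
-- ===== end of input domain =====

-- B replaces A's character-by-character line/column scan by splitting the string on '\n' once
-- and locating the removal offset arithmetically (idiomatic; same asymptotic cost).

-- ===== PORT A =====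
-- the 'for i, char in enumerate(s)' loop with its early return, carrying (current_line, current_column)
def pvA_go (s : String) (pairs : List (Int × Char)) (current_line current_column : Int)
    (line column : Int) : String :=
  match pairs with
  | [] => s
  | (i, char) :: rest =>
    if current_line = line ∧ current_column = column then
      String.ofList (PySem.List.slice s.toList none (some (i - 1)) ++
                     PySem.List.slice s.toList (some i) none)
    else if char = '\n' then
      pvA_go s rest (current_line + 1) 1 line column
    else
      pvA_go s rest current_line (current_column + 1) line column

def remove_invalid_escape (s : String) (line : Int) (column : Int) : String :=
  pvA_go s (PySem.List.enumerate s.toList 0) 1 1 line column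

-- ===== PORT B =====
def remove_invalid_escape_alt (s : String) (line : Int) (column : Int) : String :=
  let lines := PySem.Chars.splitOn s.toList ['\n']
  if line < 1 ∨ (lines.length : Int) < line ∨ column < 1 then s
  else
    -- lines[line - 1]: the guard keeps the index in range, so the default is never used (exact)
    let target := PySem.List.pyGetD lines (line - 1) []
    let limit : Int := if line < (lines.length : Int) then (target.length : Int) + 1 else (target.length : Int)
    if limit < column then s
    else
      let offset : Int := ((PySem.List.slice lines none (some (line - 1))).map (fun l => (l.length : Int) + 1)).sum
      let i := offset + column - 1
      String.ofList (PySem.List.slice s.toList none (some (i - 1)) ++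
                     PySem.List.slice s.toList (some i) none)

-- ===== PRECONDITION & SPEC =====
def Spec_remove_invalid_escape (s : String) (line : Int) (column : Int) (out : String) : Prop := out = remove_invalid_escape_alt s line column
instance (s : String) (line : Int) (column : Int) (out : String) : Decidable (Spec_remove_invalid_escape s line column out) := by unfold Spec_remove_invalid_escape; infer_instance

-- ===== CLAIM (what is proved, stated in full; the proofs are below) =====
def Claim_equal_remove_invalid_escape : Prop := ∀ (s : String) (line : Int) (column : Int), Dom_remove_invalid_escape s line column → Spec_remove_invalid_escape s line column (remove_invalid_escape s line column)

-- ===== LEMMAS AND PROOFS =====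

-- the common output shape: found index i ⇒ s[:i-1] + s[i:], not found ⇒ s
def sliceOut (s : String) (o : Option Int) : String :=
  match o with
  | some i => String.ofList (PySem.List.slice s.toList none (some (i - 1)) ++
                             PySem.List.slice s.toList (some i) none)
  | none => s

def mySplit : List Char → List (List Char)
  | [] => [[]]
  | c :: t => if c = '\n' then [] :: mySplit t else (mySplit t).modifyHead (c :: ·)

def bIdx (cs : List Char) (L C : Int) : Option Int :=
  let ls := mySplit cs
  if L < 1 ∨ (ls.length : Int) < L ∨ C < 1 then none
  else
    let tg := (ls.drop (L - 1).toNat).headD []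
    let lim : Int := if L < (ls.length : Int) then (tg.length : Int) + 1 else (tg.length : Int)
    if lim < C then none
    else some (((ls.take (L - 1).toNat).map (fun l => (l.length : Int) + 1)).sum + C - 1)

theorem mySplit_length_pos (cs : List Char) : 0 < (mySplit cs).length := by
  induction cs with
  | nil => simp [mySplit]
  | cons c t ih =>
    simp only [mySplit]
    split <;> simp [List.length_modifyHead, ih]

theorem bIdx_nil (L C : Int) : bIdx [] L C = none := by
  simp only [bIdx, mySplit, List.length_cons, List.length_nil]
  push_cast
  have e : ∀ n : Nat, ((List.drop n [([] : List Char)]).headD []) = [] := by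
    intro n; cases n <;> simp
  split_ifs <;> try rfl
  all_goals exfalso
  all_goals simp only [e, List.length_nil, Nat.cast_zero, not_lt, not_or] at *
  all_goals omega

theorem bIdx_cons_newline (t : List Char) (L C : Int) :
    bIdx ('\n' :: t) L C =
      if L = 1 then (if C = 1 then some 0 else none)
      else (bIdx t (L - 1) C).map (· + 1) := by
  have hpos := mySplit_length_pos t
  have hsplit : mySplit ('\n' :: t) = [] :: mySplit t := by simp [mySplit]
  simp only [bIdx, hsplit, List.length_cons]
  push_cast
  by_cases hL : L = 1
  · subst hL
    rw [if_pos rfl]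
    norm_num
    by_cases hC1 : C < 1
    · rw [if_pos (Or.inr hC1), if_neg (by omega)]
    · rw [if_neg (by omega), if_pos hpos]
      by_cases hC : C = 1
      · subst hC; norm_num
      · rw [if_neg hC, if_pos (by omega)]
  · rw [if_neg hL]
    by_cases hg : L - 1 < 1 ∨ ((mySplit t).length : Int) < L - 1 ∨ C < 1
    · rw [if_pos (by omega), if_pos hg]
      rfl
    · simp only [not_or, not_lt] at hg
      obtain ⟨hg1, hg2, hg3⟩ := hg
      rw [if_neg (show ¬(L < 1 ∨ ((mySplit t).length : Int) + 1 < L ∨ C < 1) from by omega),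
          if_neg (show ¬(L - 1 < 1 ∨ ((mySplit t).length : Int) < L - 1 ∨ C < 1) from by omega)]
      have ht1 : (L - 1).toNat = (L - 1 - 1).toNat + 1 := by omega
      rw [ht1, List.drop_succ_cons, List.take_succ_cons]
      simp only [show (L < ((mySplit t).length : Int) + 1) = (L - 1 < ((mySplit t).length : Int)) from
            propext (by omega)]
      by_cases hlim : (if L - 1 < ((mySplit t).length : Int)
          then ((((mySplit t).drop (L - 1 - 1).toNat).headD []).length : Int) + 1
          else ((((mySplit t).drop (L - 1 - 1).toNat).headD []).length : Int)) < C
      · rw [if_pos hlim, if_pos hlim]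
        rfl
      · rw [if_neg hlim, if_neg hlim]
        simp only [List.map_cons, List.sum_cons, List.length_nil, Option.map_some]
        push_cast
        congr 1
        ring

theorem bIdx_cons_char (ch : Char) (t : List Char) (L C : Int) (hn : ¬ ch = '\n') :
    bIdx (ch :: t) L C =
      if L = 1 ∧ C = 1 then some 0
      else if L = 1 then (bIdx t 1 (C - 1)).map (· + 1)
      else (bIdx t L C).map (· + 1) := by
  have hpos := mySplit_length_pos t
  obtain ⟨hd, tl, hmt⟩ : ∃ hd tl, mySplit t = hd :: tl := by
    cases hx : mySplit t with
    | nil => rw [hx] at hpos; simp at hpos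
    | cons a b => exact ⟨a, b, rfl⟩
  have hsplit : mySplit (ch :: t) = (ch :: hd) :: tl := by
    simp only [mySplit, if_neg hn, hmt, List.modifyHead]
  simp only [bIdx, hsplit, hmt, List.length_cons, Nat.cast_add, Nat.cast_one]
  by_cases hL : L = 1
  · subst hL
    simp only [show ((1:Int) - 1).toNat = 0 from rfl, List.drop_zero, List.take_zero,
      List.headD_cons, List.map_nil, List.sum_nil, List.length_cons, Nat.cast_add,
      Nat.cast_one, true_and]
    by_cases hC1 : C < 1
    · rw [if_pos (show (1:Int) < 1 ∨ (tl.length : Int) + 1 < 1 ∨ C < 1 from Or.inr (Or.inr hC1)),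
          if_neg (show ¬ C = 1 from by omega),
          if_pos (show (1:Int) < 1 ∨ (tl.length : Int) + 1 < 1 ∨ C - 1 < 1 from Or.inr (Or.inr (by omega)))]
      rfl
    · rw [if_neg (show ¬ ((1:Int) < 1 ∨ (tl.length : Int) + 1 < 1 ∨ C < 1) from by omega)]
      by_cases hC : C = 1
      · rw [if_pos hC]
        rw [if_neg (show ¬ (if (1:Int) < (tl.length : Int) + 1 then (hd.length : Int) + 1 + 1
            else (hd.length : Int) + 1) < C from by split_ifs <;> omega)]
        rw [hC]
        norm_num
      · rw [if_neg hC,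
            if_neg (show ¬ ((1:Int) < 1 ∨ (tl.length : Int) + 1 < 1 ∨ C - 1 < 1) from by omega)]
        by_cases hP : (1:Int) < (tl.length : Int) + 1
        · rw [if_pos hP, if_pos hP]
          by_cases hlim : (hd.length : Int) + 1 < C - 1
          · rw [if_pos (show (hd.length : Int) + 1 + 1 < C from by omega), if_pos hlim]
            rfl
          · rw [if_neg (show ¬ (hd.length : Int) + 1 + 1 < C from by omega), if_neg hlim]
            simp only [Option.map_some]
            congr 1
            ring
        · rw [if_neg hP, if_neg hP]
          by_cases hlim : (hd.length : Int) < C - 1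
          · rw [if_pos (show (hd.length : Int) + 1 < C from by omega), if_pos hlim]
            rfl
          · rw [if_neg (show ¬ (hd.length : Int) + 1 < C from by omega), if_neg hlim]
            simp only [Option.map_some]
            congr 1
            ring
  · rw [if_neg (show ¬ (L = 1 ∧ C = 1) from fun h => hL h.1), if_neg hL]
    by_cases hg : L < 1 ∨ ((tl.length : Int) + 1) < L ∨ C < 1
    · rw [if_pos hg, if_pos hg]
      rfl
    · rw [if_neg hg, if_neg hg]
      have ht1 : (L - 1).toNat = (L - 1 - 1).toNat + 1 := by omega
      simp only [ht1, List.drop_succ_cons, List.take_succ_cons]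
      by_cases hlim : (if L < (tl.length : Int) + 1
          then (((tl.drop (L - 1 - 1).toNat).headD []).length : Int) + 1
          else (((tl.drop (L - 1 - 1).toNat).headD []).length : Int)) < C
      · rw [if_pos hlim, if_pos hlim]
        rfl
      · rw [if_neg hlim, if_neg hlim]
        simp only [List.map_cons, List.sum_cons, Option.map_some, List.length_cons,
          Nat.cast_add, Nat.cast_one]
        congr 1
        ring

def findIdx : List Char → Int → Int → Int → Int → Option Int
  | [], _, _, _, _ => none
  | ch :: t, cl, cc, L, C =>
    if cl = L ∧ cc = C then some 0
    else (findIdx t (if ch = '\n' then cl + 1 else cl) (if ch = '\n' then 1 else cc + 1) L C).map (· + 1)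

-- B's index computation, in structural form

theorem findIdx_none_of_lt (t : List Char) : ∀ (cl cc L C : Int), L < cl →
    findIdx t cl cc L C = none := by
  induction t with
  | nil => intro cl cc L C _; rfl
  | cons ch t ih =>
    intro cl cc L C h
    have h1 : ¬ (cl = L ∧ cc = C) := by rintro ⟨rfl, -⟩; omega
    by_cases hn : ch = '\n' <;>
      simp [findIdx, h1, hn, ih _ _ _ _ (by omega : L < cl + 1), ih _ _ _ _ h]

theorem findIdx_shift (t : List Char) : ∀ (cl cc L C : Int), 1 ≤ cl → 1 ≤ cc →
    findIdx t cl cc L C = findIdx t 1 1 (L - cl + 1) (if L = cl then C - cc + 1 else C) := by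
  induction t with
  | nil => intro cl cc L C _ _; rfl
  | cons ch t ih =>
    intro cl cc L C hcl hcc
    by_cases h : cl = L ∧ cc = C
    · obtain ⟨rfl, rfl⟩ := h
      simp [findIdx]
    · have h' : ¬ ((1 : Int) = L - cl + 1 ∧ (1 : Int) = (if L = cl then C - cc + 1 else C)) := by
        intro hx
        obtain ⟨h1, h2⟩ := hx
        apply h
        refine ⟨by omega, ?_⟩
        by_cases hL : L = cl
        · simp [hL] at h2; omega
        · omega
      simp only [findIdx, if_neg h, if_neg h']
      by_cases hn : ch = '\n'
      · simp only [hn, if_true]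
        rw [ih (cl + 1) 1 L C (by omega) (by omega), ih (1 + 1) 1 _ _ (by omega) (by omega)]
        by_cases hL : L = cl
        · rw [findIdx_none_of_lt t _ _ _ _ (by omega),
              findIdx_none_of_lt t _ _ _ _ (by omega)]
        · have e1 : L - (cl + 1) + 1 = L - cl + 1 - (1 + 1) + 1 := by omega
          have e2 : (if L = cl + 1 then C - 1 + 1 else C) =
              (if L - cl + 1 = 1 + 1 then (if L = cl then C - cc + 1 else C) - 1 + 1
               else (if L = cl then C - cc + 1 else C)) := by
            by_cases hL2 : L = cl + 1 <;> simp [hL2, hL]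
          rw [e1, e2]
      · simp only [hn, if_false]
        rw [ih cl (cc + 1) L C (by omega) (by omega), ih 1 (1 + 1) _ _ (by omega) (by omega)]
        have e2 : (if L = cl then C - (cc + 1) + 1 else C) =
            (if L - cl + 1 = 1 then (if L = cl then C - cc + 1 else C) - (1 + 1) + 1
             else (if L = cl then C - cc + 1 else C)) := by
          by_cases hL : L = cl <;> simp [hL] <;> omega
        simp only [show L - cl + 1 - 1 + 1 = L - cl + 1 from by omega]
        rw [e2]


theorem findIdx_eq_bIdx (cs : List Char) : ∀ (L C : Int),
    findIdx cs 1 1 L C = bIdx cs L C := by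
  induction cs with
  | nil => intro L C; rw [bIdx_nil]; rfl
  | cons ch t ih =>
    intro L C
    by_cases hn : ch = '\n'
    · subst hn
      rw [bIdx_cons_newline]
      by_cases h : (1:Int) = L ∧ (1:Int) = C
      · obtain ⟨hL, hC⟩ := h
        subst hL; subst hC
        simp [findIdx]
      · simp only [findIdx, if_neg h, reduceIte]
        rw [findIdx_shift t (1 + 1) 1 L C (by omega) (by omega)]
        have e1 : L - (1 + 1) + 1 = L - 1 := by omega
        have e2 : (if L = 1 + 1 then C - 1 + 1 else C) = C := by split <;> omega
        rw [e1, e2, ih (L - 1) C]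
        by_cases hL : L = 1
        · rw [if_pos hL, if_neg (show ¬ C = 1 from fun hC => h ⟨hL.symm, hC ▸ rfl⟩)]
          subst hL
          rw [show (1:Int) - 1 = 0 from rfl]
          rw [show bIdx t 0 C = none from by
            simp only [bIdx]
            rw [if_pos (Or.inl (by omega))]]
          rfl
        · rw [if_neg hL]
    · rw [bIdx_cons_char ch t L C hn]
      by_cases h : (1:Int) = L ∧ (1:Int) = C
      · obtain ⟨hL, hC⟩ := h
        subst hL; subst hC
        simp [findIdx]
      · simp only [findIdx, if_neg h, if_neg hn]
        rw [if_neg (show ¬ (L = 1 ∧ C = 1) from fun hx => h ⟨hx.1.symm, hx.2.symm⟩)]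
        rw [findIdx_shift t 1 (1 + 1) L C (by omega) (by omega)]
        by_cases hL : L = 1
        · rw [if_pos hL, if_pos hL]
          subst hL
          rw [show (1:Int) - 1 + 1 = 1 from by ring, show C - (1 + 1) + 1 = C - 1 from by ring,
            ih 1 (C - 1)]
        · rw [if_neg hL, if_neg hL]
          rw [show L - 1 + 1 = L from by ring, ih L C]

theorem splitOn_go_nl (l : List Char) : ∀ (fuel : Nat) (cur : List Char) (acc : List (List Char)),
    l.length ≤ fuel →
    PySem.Chars.splitOn.go ['\n'] fuel l cur acc =
      acc.reverse ++ (mySplit l).modifyHead (cur.reverse ++ ·) := by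
  induction l with
  | nil =>
    intro fuel cur acc _
    cases fuel <;> simp [PySem.Chars.splitOn.go, mySplit]
  | cons c rest ih =>
    intro fuel cur acc hf
    cases fuel with
    | zero => simp at hf
    | succ f =>
      by_cases hc : c = '\n'
      · subst hc
        rw [PySem.Chars.splitOn.go]
        simp only [List.isPrefixOf, BEq.rfl, Bool.true_and, if_true,
          List.length_singleton, List.drop_succ_cons, List.drop_zero]
        rw [ih f [] (cur.reverse :: acc) (by simp at hf; omega)]
        simp only [mySplit, List.reverse_cons, List.modifyHead]
        simp
        cases mySplit rest <;> rfl
      · rw [PySem.Chars.splitOn.go]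
        simp only [List.isPrefixOf, Bool.and_true]
        rw [if_neg (by simp [Ne.symm hc])]
        rw [ih f (c :: cur) acc (by simp at hf; omega)]
        have hms : mySplit (c :: rest) = (mySplit rest).modifyHead (c :: ·) := by
          simp [mySplit, hc]
        rw [hms, List.modifyHead_modifyHead]
        congr 2
        funext x
        simp

theorem splitOn_eq_mySplit (cs : List Char) :
    PySem.Chars.splitOn cs ['\n'] = mySplit cs := by
  show PySem.Chars.splitOn.go ['\n'] (cs.length + 1) cs [] [] = mySplit cs
  rw [splitOn_go_nl cs (cs.length + 1) [] [] (by omega)]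
  simp
  cases mySplit cs <;> rfl


theorem pvA_go_eq (t : List Char) : ∀ (k cl cc L C : Int) (s : String),
    pvA_go s (PySem.List.enumerate t k) cl cc L C = sliceOut s ((findIdx t cl cc L C).map (k + ·)) := by
  induction t with
  | nil => intro k cl cc L C s; simp [pvA_go, findIdx, sliceOut, PySem.List.enumerate]
  | cons ch t ih =>
    intro k cl cc L C s
    rw [PySem.List.enumerate_cons]
    by_cases h : cl = L ∧ cc = C
    · simp [pvA_go, findIdx, h, sliceOut]
    · by_cases hn : ch = '\n'
      · simp only [pvA_go, findIdx, if_neg h, hn, if_true, ih]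
        congr 1
        cases findIdx t (cl + 1) 1 L C with
        | none => simp
        | some j => simp; ring_nf
      · simp only [pvA_go, findIdx, if_neg h, hn, if_false, ih]
        congr 1
        cases findIdx t cl (cc + 1) L C with
        | none => simp
        | some j => simp; ring_nf

theorem a_eq_sliceOut (s : String) (L C : Int) :
    remove_invalid_escape s L C = sliceOut s (findIdx s.toList 1 1 L C) := by
  unfold remove_invalid_escape
  rw [pvA_go_eq]
  congr 1
  cases findIdx s.toList 1 1 L C <;> simp

theorem alt_eq_sliceOut (s : String) (L C : Int) :
    remove_invalid_escape_alt s L C = sliceOut s (bIdx s.toList L C) := by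
  unfold remove_invalid_escape_alt
  rw [splitOn_eq_mySplit]
  simp only [bIdx, sliceOut]
  by_cases hg : L < 1 ∨ ((mySplit s.toList).length : Int) < L ∨ C < 1
  · rw [if_pos hg, if_pos hg]
  · rw [if_neg hg, if_neg hg]
    have hlen : (L - 1).toNat < (mySplit s.toList).length := by omega
    have e_tg : PySem.List.pyGetD (mySplit s.toList) (L - 1) ([] : List Char) =
        ((mySplit s.toList).drop (L - 1).toNat).headD [] := by
      rw [PySem.List.pyGetD_eq_getElem _ _ (by omega) (by exact_mod_cast by omega)]
      rw [List.headD_eq_head?, List.head?_drop, List.getElem?_eq_getElem hlen]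
      rfl
    have e_off : PySem.List.slice (mySplit s.toList) none (some (L - 1)) =
        (mySplit s.toList).take (L - 1).toNat := PySem.List.slice_to _ (by omega)
    rw [e_tg, e_off]
    split_ifs <;> rfl

-- ===== VERDICT (by name: the statement is the Claim_ definition above) =====
theorem remove_invalid_escape_spec : Claim_equal_remove_invalid_escape := by
  unfold Claim_equal_remove_invalid_escape
  intro s line column _
  unfold Spec_remove_invalid_escape
  rw [a_eq_sliceOut, alt_eq_sliceOut, findIdx_eq_bIdx]
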